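-- pv_equiv track=rewrite | github.com/Maxencejules/retail-analytics-lakehouse | infra/airflow/dags/common/run_metadata.py | derive_overall_status
-- ===== SOURCE A (Python) =====
-- from typing import Any
--
-- TERMINAL_FAILURE_STATES = {"failed", "upstream_failed"}
--
-- TERMINAL_SUCCESS_STATES = {"success"}
--
-- TERMINAL_NON_SUCCESS_STATES = {"skipped", "removed"}
--
-- def derive_overall_status(task_states: list[dict[str, Any]]) -> str:
--     """Derive a stable run status from task states."""
--     states = {str(task["state"]) for task in task_states if task.get("state")}
--     if states & TERMINAL_FAILURE_STATES:
--         return "failed"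
--     if states and states.issubset(TERMINAL_SUCCESS_STATES):
--         return "success"
--     if states and states.issubset(TERMINAL_SUCCESS_STATES | TERMINAL_NON_SUCCESS_STATES):
--         return "partial_success"
--     return "unknown"
-- ===== SOURCE B (Python) =====
-- TERMINAL_FAILURE_STATES = {"failed", "upstream_failed"}
-- TERMINAL_SUCCESS_STATES = {"success"}
-- TERMINAL_NON_SUCCESS_STATES = {"skipped", "removed"}
--
-- def derive_overall_status(task_states: list) -> str:
--     """Derive a stable run status from task states (single pass, boolean flags)."""
--     seen = False
--     has_failure = False
--     outside_success = False
--     outside_known = False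
--     for task in task_states:
--         state = task.get("state")
--         if not state:
--             continue
--         s = str(state)
--         seen = True
--         if s in TERMINAL_FAILURE_STATES:
--             has_failure = True
--         if s not in TERMINAL_SUCCESS_STATES:
--             outside_success = True
--             if s not in TERMINAL_NON_SUCCESS_STATES:
--                 outside_known = True
--     if has_failure:
--         return "failed"
--     if not seen:
--         return "unknown"
--     if not outside_success:
--         return "success"
--     if not outside_known:
--         return "partial_success"
--     return "unknown"
-- ===== Notes on version B (the rewrite author's own statement) =====
-- stated objective: simpler
-- what changed: Replaces the intermediate set comprehension plus set-intersection/subset tests with a single pass over task_states that maintains four boolean flags and a final flag-based decision chain.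
import Mathlib
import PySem

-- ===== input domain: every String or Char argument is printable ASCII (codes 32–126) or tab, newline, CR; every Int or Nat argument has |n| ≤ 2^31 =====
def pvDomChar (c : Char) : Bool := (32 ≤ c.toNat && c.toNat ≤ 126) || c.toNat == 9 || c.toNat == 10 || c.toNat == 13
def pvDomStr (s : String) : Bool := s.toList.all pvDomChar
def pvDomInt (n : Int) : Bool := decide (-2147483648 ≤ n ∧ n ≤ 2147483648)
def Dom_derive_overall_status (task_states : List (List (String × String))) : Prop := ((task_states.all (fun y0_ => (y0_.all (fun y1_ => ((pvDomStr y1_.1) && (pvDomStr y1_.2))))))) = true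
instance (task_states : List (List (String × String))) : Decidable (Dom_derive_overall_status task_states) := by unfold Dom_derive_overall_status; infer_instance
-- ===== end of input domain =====

-- B replaces A's intermediate set and subset/intersection tests with one pass keeping four boolean flags (objective: simpler).


-- ===== PORT A =====
def pvFailureStates : PySem.Set String := PySem.Set.ofList ["failed", "upstream_failed"]
def pvSuccessStates : PySem.Set String := PySem.Set.ofList ["success"]
def pvNonSuccessStates : PySem.Set String := PySem.Set.ofList ["skipped", "removed"]

def derive_overall_status (task_states : List (List (String × String))) : String :=
  -- states = {str(task["state"]) for task in task_states if task.get("state")}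
  let states : PySem.Set String := task_states.foldl (fun acc task =>
    match (PySem.Dict.mk task).get? "state" with
    | some s => if s ≠ "" then PySem.Set.add acc s else acc
    | none => acc) PySem.Set.empty
  if PySem.Set.inter states pvFailureStates ≠ [] then "failed"
  else if states ≠ [] ∧ PySem.Set.issubset states pvSuccessStates then "success"
  else if states ≠ [] ∧ PySem.Set.issubset states (PySem.Set.union pvSuccessStates pvNonSuccessStates) then "partial_success"
  else "unknown"

-- ===== PORT B =====
def derive_overall_status_alt (task_states : List (List (String × String))) : String :=
  -- one pass maintaining (seen, has_failure, outside_success, outside_known)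
  let f : Bool × Bool × Bool × Bool := task_states.foldl (fun f task =>
    match (PySem.Dict.mk task).get? "state" with
    | some s =>
        if s ≠ "" then
          (true,
           f.2.1 || (s == "failed" || s == "upstream_failed"),
           f.2.2.1 || !(s == "success"),
           f.2.2.2 || (!(s == "success") && !(s == "skipped" || s == "removed")))
        else f
    | none => f) (false, false, false, false)
  if f.2.1 then "failed"
  else if !f.1 then "unknown"
  else if !f.2.2.1 then "success"
  else if !f.2.2.2 then "partial_success"
  else "unknown"

-- ===== PRECONDITION & SPEC =====
def Spec_derive_overall_status (task_states : List (List (String × String))) (out : String) : Prop := out = derive_overall_status_alt task_states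
instance (task_states : List (List (String × String))) (out : String) : Decidable (Spec_derive_overall_status task_states out) := by unfold Spec_derive_overall_status; infer_instance

-- ===== CLAIM (what is proved, stated in full; the proofs are below) =====
def Claim_equal_derive_overall_status : Prop := ∀ (task_states : List (List (String × String))), Dom_derive_overall_status task_states → Spec_derive_overall_status task_states (derive_overall_status task_states)

-- ===== LEMMAS AND PROOFS =====

-- the invariant tying B's flags to A's set
def pvRel (st : PySem.Set String) (f : Bool × Bool × Bool × Bool) : Prop :=
  f.1 = decide (st ≠ []) ∧
  f.2.1 = st.any (fun s => s == "failed" || s == "upstream_failed") ∧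
  f.2.2.1 = st.any (fun s => !(s == "success")) ∧
  f.2.2.2 = st.any (fun s => !(s == "success") && !(s == "skipped" || s == "removed"))

theorem pvAny_add (st : PySem.Set String) (x : String) (p : String → Bool) :
    (PySem.Set.add st x).any p = (st.any p || p x) := by
  by_cases hx : x ∈ st
  · cases hp : p x with
    | false => simp [PySem.Set.add, hx]
    | true =>
      have hany : st.any p = true := List.any_eq_true.mpr ⟨x, hx, hp⟩
      simp [PySem.Set.add, hx, hany]
  · simp [PySem.Set.add, hx, List.any_append]

theorem pvNe_add (st : PySem.Set String) (x : String) :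
    PySem.Set.add st x ≠ [] := by
  unfold PySem.Set.add
  split
  · next h => exact List.ne_nil_of_mem ((PySem.Set.contains_iff st x).mp h)
  · simp

theorem pvRel_step (st : PySem.Set String) (f : Bool × Bool × Bool × Bool)
    (task : List (String × String)) (h : pvRel st f) :
    pvRel
      (match (PySem.Dict.mk task).get? "state" with
       | some s => if s ≠ "" then PySem.Set.add st s else st
       | none => st)
      (match (PySem.Dict.mk task).get? "state" with
       | some s =>
           if s ≠ "" then
             (true,
              f.2.1 || (s == "failed" || s == "upstream_failed"),
              f.2.2.1 || !(s == "success"),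
              f.2.2.2 || (!(s == "success") && !(s == "skipped" || s == "removed")))
           else f
       | none => f) := by
  obtain ⟨h1, h2, h3, h4⟩ := h
  cases hg : (PySem.Dict.mk task).get? "state" with
  | none => exact ⟨h1, h2, h3, h4⟩
  | some s =>
    dsimp only
    by_cases hs : s = ""
    · rw [if_neg (fun hne => hne hs), if_neg (fun hne => hne hs)]
      exact ⟨h1, h2, h3, h4⟩
    · rw [if_pos hs, if_pos hs]
      refine ⟨?_, ?_, ?_, ?_⟩
      · simp [pvNe_add st s]
      · simp [pvAny_add, h2]
      · simp [pvAny_add, h3]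
      · simp [pvAny_add, h4]

theorem pvRel_fold (ts : List (List (String × String)))
    (st : PySem.Set String) (f : Bool × Bool × Bool × Bool) (h : pvRel st f) :
    pvRel
      (ts.foldl (fun acc task =>
        match (PySem.Dict.mk task).get? "state" with
        | some s => if s ≠ "" then PySem.Set.add acc s else acc
        | none => acc) st)
      (ts.foldl (fun f task =>
        match (PySem.Dict.mk task).get? "state" with
        | some s =>
            if s ≠ "" then
              (true,
               f.2.1 || (s == "failed" || s == "upstream_failed"),
               f.2.2.1 || !(s == "success"),
               f.2.2.2 || (!(s == "success") && !(s == "skipped" || s == "removed")))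
            else f
        | none => f) f) := by
  induction ts generalizing st f with
  | nil => exact h
  | cons t rest ih =>
    simp only [List.foldl_cons]
    exact ih _ _ (pvRel_step st f t h)

-- with pvRel in hand, A's conditions are exactly B's flags
theorem pvFinal (st : PySem.Set String) (f : Bool × Bool × Bool × Bool) (h : pvRel st f) :
    (if PySem.Set.inter st pvFailureStates ≠ [] then "failed"
     else if st ≠ [] ∧ PySem.Set.issubset st pvSuccessStates then "success"
     else if st ≠ [] ∧ PySem.Set.issubset st (PySem.Set.union pvSuccessStates pvNonSuccessStates) then "partial_success"
     else "unknown") =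
    (if f.2.1 then "failed"
     else if !f.1 then "unknown"
     else if !f.2.2.1 then "success"
     else if !f.2.2.2 then "partial_success"
     else "unknown") := by
  obtain ⟨h1, h2, h3, h4⟩ := h
  have hinter : (PySem.Set.inter st pvFailureStates ≠ []) ↔
      (st.any (fun s => s == "failed" || s == "upstream_failed")) = true := by
    constructor
    · intro hne
      obtain ⟨x, hx⟩ := List.exists_mem_of_ne_nil _ hne
      have hm := (PySem.Set.mem_inter st pvFailureStates x).mp hx
      refine List.any_eq_true.mpr ⟨x, hm.1, ?_⟩
      have hxf : x ∈ pvFailureStates := hm.2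
      simp [pvFailureStates, PySem.Set.mem_ofList] at hxf
      rcases hxf with h | h <;> simp [h]
    · intro hany
      obtain ⟨x, hxs, hxp⟩ := List.any_eq_true.mp hany
      intro hnil
      have hxf : x ∈ pvFailureStates := by
        simp only [pvFailureStates, PySem.Set.mem_ofList, List.mem_cons,
          List.not_mem_nil, or_false]
        rcases Bool.or_eq_true_iff.mp hxp with h | h
        · exact Or.inl (by simpa using h)
        · exact Or.inr (by simpa using h)
      have hmem : x ∈ PySem.Set.inter st pvFailureStates :=
        (PySem.Set.mem_inter st pvFailureStates x).mpr ⟨hxs, hxf⟩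
      rw [hnil] at hmem
      exact absurd hmem (List.not_mem_nil)
  have hsub1 : PySem.Set.issubset st pvSuccessStates = true ↔
      (st.any (fun s => !(s == "success"))) = false := by
    rw [PySem.Set.issubset_iff]
    constructor
    · intro hall
      rw [List.any_eq_false]
      intro x hx
      have hm := hall x hx
      simp [pvSuccessStates, PySem.Set.mem_ofList] at hm
      simp [hm]
    · intro hno x hx
      have hm := List.any_eq_false.mp hno x hx
      simp at hm
      simp [pvSuccessStates, PySem.Set.mem_ofList, hm]
  have hsub2 : PySem.Set.issubset st (PySem.Set.union pvSuccessStates pvNonSuccessStates) = true ↔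
      (st.any (fun s => !(s == "success") && !(s == "skipped" || s == "removed"))) = false := by
    rw [PySem.Set.issubset_iff]
    constructor
    · intro hall
      rw [List.any_eq_false]
      intro x hx
      have hm := hall x hx
      rw [PySem.Set.mem_union] at hm
      simp [pvSuccessStates, pvNonSuccessStates, PySem.Set.mem_ofList] at hm
      rcases hm with h | h | h <;> simp [h]
    · intro hno x hx
      have hm := List.any_eq_false.mp hno x hx
      rw [PySem.Set.mem_union]
      by_cases hsx : x = "success"
      · simp [pvSuccessStates, PySem.Set.mem_ofList, hsx]
      · by_cases hsk : x = "skipped"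
        · simp [pvNonSuccessStates, PySem.Set.mem_ofList, hsk]
        · have hr : x = "removed" := by
            simp [hsx, hsk] at hm
            exact hm
          simp [pvNonSuccessStates, PySem.Set.mem_ofList, hr]
  cases hfail : (st.any (fun s => s == "failed" || s == "upstream_failed")) with
  | true => rw [if_pos (hinter.mpr hfail), h2, hfail, if_pos rfl]
  | false =>
    rw [if_neg (fun hc => absurd (hinter.mp hc) (by simp [hfail])), h2, hfail]
    simp only [Bool.false_eq_true, if_false]
    by_cases hnil : st = []
    · subst hnil
      simp [h1]
    · have h1' : f.1 = true := by simp [h1, hnil]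
      rw [h1', Bool.not_true]
      simp only [Bool.false_eq_true, if_false]
      cases hs1 : (st.any (fun s => !(s == "success"))) with
      | false =>
        rw [if_pos ⟨hnil, hsub1.mpr hs1⟩, h3, hs1]
        rfl
      | true =>
        have hns : ¬ (st ≠ [] ∧ PySem.Set.issubset st pvSuccessStates = true) := by
          rintro ⟨-, hsub⟩
          rw [hsub1.mp hsub] at hs1
          exact Bool.false_ne_true hs1
        rw [if_neg hns, h3, hs1, Bool.not_true]
        simp only [Bool.false_eq_true, if_false]
        cases hs2 : (st.any (fun s => !(s == "success") && !(s == "skipped" || s == "removed"))) with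
        | false =>
          rw [if_pos ⟨hnil, hsub2.mpr hs2⟩, h4, hs2]
          rfl
        | true =>
          have hns2 : ¬ (st ≠ [] ∧
              PySem.Set.issubset st (PySem.Set.union pvSuccessStates pvNonSuccessStates) = true) := by
            rintro ⟨-, hsub⟩
            rw [hsub2.mp hsub] at hs2
            exact Bool.false_ne_true hs2
          rw [if_neg hns2, h4, hs2, Bool.not_true]
          rfl

-- ===== VERDICT (by name: the statement is the Claim_ definition above) =====
theorem derive_overall_status_spec : Claim_equal_derive_overall_status := by
  intro ts _
  unfold Spec_derive_overall_status derive_overall_status derive_overall_status_alt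
  exact pvFinal _ _ (pvRel_fold ts PySem.Set.empty (false, false, false, false)
    ⟨rfl, rfl, rfl, rfl⟩)
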